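-- pv_equiv track=rewrite | github.com/r-aax/crys-gsu | src/utils.py | group_txt_files_by_timestamps
-- ===== SOURCE A (Python) =====
-- def group_txt_files_by_timestamps(fs):
--     """
--     Group list of files [f1, f2, ..., fn] into set { timestamp : list of files }.
--     :param fs: files
--     :return: set of timestamp : list of files.
--     """
--
--     d = dict()
--
--     for f in fs:
--         tm = f[-16:-4]
--         if tm in d:
--             v = d.get(tm)
--             v.append(f)
--             d.update([(tm, v)])
--         else:
--             d.update([(tm, [f])])
--
--     return d
-- ===== SOURCE B (Python) =====
-- def group_txt_files_by_timestamps(fs):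
--     """Recursive partition: peel off the whole group of the first file's
--     timestamp, then recurse on the files with a different timestamp."""
--     if not fs:
--         return {}
--     k = fs[0][-16:-4]
--     d = {k: [f for f in fs if f[-16:-4] == k]}
--     d.update(group_txt_files_by_timestamps([f for f in fs if f[-16:-4] != k]))
--     return d
-- ===== Notes on version B (the rewrite author's own statement) =====
-- stated objective: alternative
-- what changed: Replaced A's single-pass incremental dict mutation (membership test, get, append, update per element) by a dict-free recursive partition: peel off the entire group sharing the first file's timestamp with two filters, recurse on the remainder, and prepend the group.
import Mathlib
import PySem

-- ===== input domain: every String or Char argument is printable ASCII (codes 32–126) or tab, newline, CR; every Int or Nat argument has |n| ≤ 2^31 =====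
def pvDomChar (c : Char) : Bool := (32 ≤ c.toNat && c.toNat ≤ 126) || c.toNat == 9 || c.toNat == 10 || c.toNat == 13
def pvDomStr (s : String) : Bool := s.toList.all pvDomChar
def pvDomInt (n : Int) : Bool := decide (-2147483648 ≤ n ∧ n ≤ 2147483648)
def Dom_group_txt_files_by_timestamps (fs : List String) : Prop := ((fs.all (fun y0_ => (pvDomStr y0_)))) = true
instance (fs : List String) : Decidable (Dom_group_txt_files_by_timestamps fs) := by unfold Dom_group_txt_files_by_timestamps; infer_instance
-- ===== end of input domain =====

-- B replaces A's incremental dict-mutation loop by a dict-free recursive partition: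
-- peel off the whole group of the first file's timestamp, recurse on the rest;
-- objective: alternative algorithm (no hash grouping at all).

-- ===== PORT A =====
def group_txt_files_by_timestamps (fs : List String) : List (String × List String) :=
  (fs.foldl (fun d f =>
      let tm := PySem.Str.slice f (some (-16)) (some (-4))
      if d.contains tm then
        let v := (d.get? tm).getD []
        d.insert tm (v ++ [f])
      else
        d.insert tm [f])
    (PySem.Dict.empty : PySem.Dict String (List String))).items

-- ===== PORT B =====
def group_txt_files_by_timestamps_alt (fs : List String) : List (String × List String) :=
  match fs with
  | [] => []
  | f :: t =>
    let k := PySem.Str.slice f (some (-16)) (some (-4))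
    let same := (f :: t).filter (fun g => PySem.Str.slice g (some (-16)) (some (-4)) == k)
    let rest := (f :: t).filter (fun g => !(PySem.Str.slice g (some (-16)) (some (-4)) == k))
    -- d = {k: same}; d.update(recursion on rest): every recursive key is a timestamp of
    -- rest, hence ≠ k, so the update appends fresh keys — items = (k, same) :: recursion
    (k, same) :: group_txt_files_by_timestamps_alt rest
termination_by fs.length
decreasing_by
  simp only [List.filter_cons, beq_self_eq_true, Bool.not_true, List.length_cons]
  exact Nat.lt_succ_of_le (List.length_filter_le _ _)

-- ===== PRECONDITION & SPEC =====
def Spec_group_txt_files_by_timestamps (fs : List String) (out : List (String × List String)) : Prop := out = group_txt_files_by_timestamps_alt fs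
instance (fs : List String) (out : List (String × List String)) : Decidable (Spec_group_txt_files_by_timestamps fs out) := by unfold Spec_group_txt_files_by_timestamps; infer_instance

-- ===== CLAIM (what is proved, stated in full; the proofs are below) =====
def Claim_equal_group_txt_files_by_timestamps : Prop := ∀ (fs : List String), Dom_group_txt_files_by_timestamps fs → Spec_group_txt_files_by_timestamps fs (group_txt_files_by_timestamps fs)

-- ===== LEMMAS AND PROOFS =====

-- the timestamp key of a file
def pvKey (f : String) : String := PySem.Str.slice f (some (-16)) (some (-4))

-- the canonical grouping both programs compute
def pvCanon (fs : List String) : List (String × List String) :=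
  (PySem.List.dedup (fs.map pvKey)).map
    (fun k => (k, fs.filter (fun f => pvKey f == k)))

-- A's loop body is exactly 'append f to the group of its key', i.e. Dict.modify.
theorem pv_step_eq_modify (d : PySem.Dict String (List String)) (f : String) :
    (let tm := PySem.Str.slice f (some (-16)) (some (-4))
     if d.contains tm then
       let v := (d.get? tm).getD []
       d.insert tm (v ++ [f])
     else
       d.insert tm [f]) =
      d.modify (PySem.Str.slice f (some (-16)) (some (-4))) [] (· ++ [f]) := by
  have hm : ∀ (k : String) (g : List String → List String),
      d.modify k [] g = d.insert k (g (d.getD k [])) := fun _ _ => rfl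
  rw [hm]
  show (if d.contains (PySem.Str.slice f (some (-16)) (some (-4))) = true then
      d.insert (PySem.Str.slice f (some (-16)) (some (-4)))
        ((d.get? (PySem.Str.slice f (some (-16)) (some (-4)))).getD [] ++ [f])
    else d.insert (PySem.Str.slice f (some (-16)) (some (-4))) [f]) = _
  split_ifs with h
  · rw [PySem.Dict.getD_eq_get?_getD]
  · rw [PySem.Dict.getD_of_not_contains (h := by simpa using h)]
    rfl

-- A computes the canonical grouping.
theorem pv_A_canon (fs : List String) :
    group_txt_files_by_timestamps fs = pvCanon fs := by
  unfold group_txt_files_by_timestamps pvCanon pvKey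
  simp only [pv_step_eq_modify]
  have hnd : (fs.foldl (fun d f =>
      d.modify (PySem.Str.slice f (some (-16)) (some (-4))) [] (· ++ [f]))
      (PySem.Dict.empty : PySem.Dict String (List String))).keys.Nodup := by
    exact PySem.Dict.nodup_keys_foldl_modify_key fs
      (fun f => PySem.Str.slice f (some (-16)) (some (-4))) []
      (fun d f => (· ++ [f])) _ PySem.Dict.nodup_keys_empty
  rw [PySem.Dict.items_eq_map_keys _ hnd []]
  have hkeys : (fs.foldl (fun d f =>
      d.modify (PySem.Str.slice f (some (-16)) (some (-4))) [] (· ++ [f]))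
      (PySem.Dict.empty : PySem.Dict String (List String))).keys =
      PySem.List.dedup (fs.map (fun f => PySem.Str.slice f (some (-16)) (some (-4)))) := by
    rw [PySem.Dict.keys_foldl_modify_key]
    simp [PySem.Dict.keys_empty, PySem.List.dedup_eq_ofList, PySem.Set.ofList_eq_foldl,
      PySem.Set.update]
  rw [hkeys]
  apply List.map_congr_left
  intro k _
  congr 1
  have hfold : fs.foldl (fun d f =>
      d.modify (PySem.Str.slice f (some (-16)) (some (-4))) [] (· ++ [f]))
      (PySem.Dict.empty : PySem.Dict String (List String)) =
      (fs.map (fun f => (PySem.Str.slice f (some (-16)) (some (-4)), f))).foldl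
        (fun d p => d.modify p.1 [] (· ++ [p.2])) PySem.Dict.empty := by
    rw [List.foldl_map]
  rw [hfold, PySem.Dict.getD_foldl_modify_append]
  simp [List.filter_map, Function.comp_def]

-- adding an element already in the set is a no-op; foldl-add over a filtered list
theorem pv_fold_add_filter {α : Type} [BEq α] [LawfulBEq α] (a : α) :
    ∀ (l : List α) (s : PySem.Set α), a ∈ s →
      l.foldl PySem.Set.add s = (l.filter (fun x => !(x == a))).foldl PySem.Set.add s := by
  intro l
  induction l with
  | nil => intro s _; rfl
  | cons x t ih =>
    intro s hs
    by_cases hx : x = a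
    · subst hx
      have hc : PySem.Set.add s x = s := by
        simp [PySem.Set.add, PySem.Set.contains, List.contains_eq_mem, hs]
      simp only [List.filter_cons, beq_self_eq_true, Bool.not_true,
        List.foldl_cons, hc]
      exact ih s hs
    · have hb : (x == a) = false := by simpa using hx
      simp only [List.filter_cons, hb, Bool.not_false, if_true, List.foldl_cons]
      have hmem : a ∈ PySem.Set.add s x := by
        simp only [PySem.Set.add]
        split
        · exact hs
        · exact List.mem_append_left _ hs
      exact ih _ hmem

-- prepending a fresh element commutes with foldl-add when nothing in l matches it
theorem pv_fold_add_cons {α : Type} [BEq α] [LawfulBEq α] (a : α) :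
    ∀ (l : List α) (s : PySem.Set α), (∀ x ∈ l, (x == a) = false) →
      l.foldl PySem.Set.add (a :: s) = a :: l.foldl PySem.Set.add s := by
  intro l
  induction l with
  | nil => intro s _; rfl
  | cons x t ih =>
    intro s hl
    have hxa : (x == a) = false := hl x (by simp)
    have hstep : PySem.Set.add (a :: s) x = a :: PySem.Set.add s x := by
      have hc : List.contains (a :: s) x = List.contains s x := by
        simp only [List.contains_eq_mem, List.mem_cons, decide_eq_decide]
        constructor
        · rintro (h | h)
          · subst h; simp at hxa
          · exact h
        · exact Or.inr
      simp only [PySem.Set.add, PySem.Set.contains, hc]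
      split <;> rfl
    simp only [List.foldl_cons, hstep]
    exact ih _ (fun y hy => hl y (by simp [hy]))

-- dedup peels off the head together with all of its later duplicates
theorem pv_dedup_cons {α : Type} [BEq α] [LawfulBEq α] (a : α) (l : List α) :
    PySem.List.dedup (a :: l) = a :: PySem.List.dedup (l.filter (fun x => !(x == a))) := by
  have h0 : PySem.List.dedup (a :: l) = l.foldl PySem.Set.add [a] := by
    simp [PySem.List.dedup, PySem.Set.ofList, PySem.Set.add, PySem.Set.contains,
      PySem.Set.empty]
  rw [h0, pv_fold_add_filter a l [a] (by simp)]
  have hfresh : ∀ x ∈ l.filter (fun x => !(x == a)), (x == a) = false := by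
    intro x hx
    have := List.of_mem_filter hx
    simpa using this
  have : ([a] : PySem.Set α) = a :: ([] : PySem.Set α) := rfl
  rw [this, pv_fold_add_cons a _ _ hfresh]
  rfl

-- mapping the key commutes with filtering on the key
theorem pv_map_filter (p : String → Bool) (l : List String) :
    (l.filter (fun g => p (pvKey g))).map pvKey = (l.map pvKey).filter p := by
  induction l with
  | nil => rfl
  | cons x t ih =>
    simp only [List.filter_cons, List.map_cons]
    by_cases h : p (pvKey x) = true
    · simp [h, ih]
    · simp only [Bool.not_eq_true] at h
      simp [h, ih]

-- B computes the canonical grouping too (strong induction on length).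
theorem pv_B_canon (fs : List String) :
    group_txt_files_by_timestamps_alt fs = pvCanon fs := by
  induction hn : fs.length using Nat.strong_induction_on generalizing fs with
  | _ n ih =>
  match fs, hn with
  | [], _ =>
    rw [group_txt_files_by_timestamps_alt]
    rfl
  | f :: t, hn =>
    rw [group_txt_files_by_timestamps_alt]
    set k := PySem.Str.slice f (some (-16)) (some (-4)) with hk
    have hkf : pvKey f = k := rfl
    have hrest : (f :: t).filter (fun g => !(PySem.Str.slice g (some (-16)) (some (-4)) == k))
        = t.filter (fun g => !(pvKey g == k)) := by
      simp [pvKey, ← hk]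
    have hlen : (t.filter (fun g => !(pvKey g == k))).length < n := by
      subst hn
      exact Nat.lt_succ_of_le (List.length_filter_le _ _)
    rw [hrest, ih _ hlen _ rfl]
    unfold pvCanon
    have hmapcons : (f :: t).map pvKey = k :: t.map pvKey := by simp [hkf]
    rw [hmapcons, pv_dedup_cons, List.map_cons]
    have hmapfilter : (t.filter (fun g => !(pvKey g == k))).map pvKey
        = (t.map pvKey).filter (fun x => !(x == k)) := pv_map_filter (fun x => !(x == k)) t
    rw [hmapfilter]
    refine congrArg₂ _ ?_ ?_
    · -- head group
      simp [pvKey, ← hk]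
    · -- tail groups: for each k' ≠ k, filtering rest equals filtering fs
      apply List.map_congr_left
      intro k' hk'
      have hne : (k' == k) = false := by
        have := (PySem.List.mem_dedup _ _).mp hk'
        have := List.of_mem_filter this
        simpa using this
      congr 1
      have hhead : (pvKey f == k') = false := by
        rw [hkf]
        cases hbe : (k == k') with
        | false => rfl
        | true => exact absurd (by simpa using (eq_of_beq hbe).symm) (by simpa using hne)
      simp only [List.filter_cons, hhead]
      rw [List.filter_filter]
      apply List.filter_congr
      intro g _
      cases hg : (pvKey g == k') with
      | false => simp
      | true =>
        have : pvKey g = k' := eq_of_beq hg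
        simp [this, hne]

-- ===== VERDICT (by name: the statement is the Claim_ definition above) =====
theorem group_txt_files_by_timestamps_spec : Claim_equal_group_txt_files_by_timestamps := by
  intro fs _
  show group_txt_files_by_timestamps fs = group_txt_files_by_timestamps_alt fs
  rw [pv_A_canon, pv_B_canon]
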